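-- pv_equiv track=rewrite | github.com/sachinmasti/pythhon_files- | python_practice_day_24.py | even_num_pro
-- ===== SOURCE A (Python) =====
-- def even_num_pro(n) -> int:
--     count = 1
--     even_num = []
--     while n>0:
--         d= n % 10
--         if d % 2==0:
--             even_num.append(d)
--         n //= 10
--
--     if len(even_num) ==0:
--         return 0
--     for i in range(len(even_num)):
--         count *= even_num[i]
--     return count
-- ===== SOURCE B (Python) =====
-- def even_num_pro(n) -> int:
--     prod = 1
--     found = False
--     while n > 0:
--         d = n % 10
--         if d % 2 == 0:
--             prod *= d
--             found = True
--         n //= 10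
--     return prod if found else 0
-- ===== Notes on version B (the rewrite author's own statement) =====
-- stated objective: simpler
-- what changed: Single streaming pass with a running product and a found flag instead of building a list of even digits and multiplying it in a second loop.
import Mathlib
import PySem

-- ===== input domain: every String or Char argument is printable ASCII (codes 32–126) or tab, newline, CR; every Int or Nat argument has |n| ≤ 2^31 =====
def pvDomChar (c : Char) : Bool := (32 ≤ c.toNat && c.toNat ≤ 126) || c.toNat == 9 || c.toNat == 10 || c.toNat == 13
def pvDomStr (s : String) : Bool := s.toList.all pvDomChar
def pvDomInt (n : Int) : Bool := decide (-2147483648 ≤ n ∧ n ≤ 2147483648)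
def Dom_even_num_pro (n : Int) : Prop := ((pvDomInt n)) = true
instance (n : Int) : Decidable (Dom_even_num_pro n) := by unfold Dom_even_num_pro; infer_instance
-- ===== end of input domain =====

-- B fuses A's build-list-then-multiply structure into one streaming pass with a found flag; objective: simpler.
-- ===== PORT A =====
-- the while loop of A: collect even digits of n (least significant first), in append order
def evenDigitsA (n : Int) : List Int :=
  if h : n > 0 then
    (if PySem.Int.mod n 10 % 2 == 0 then [PySem.Int.mod n 10] else [])
      ++ evenDigitsA (PySem.Int.floordiv n 10)
  else []
termination_by n.toNat
decreasing_by
  rw [PySem.Int.floordiv_eq_ediv_of_pos (by omega)]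
  omega

def even_num_pro (n : Int) : Int :=
  let even_num := evenDigitsA n
  if even_num.length = 0 then 0
  else even_num.foldl (· * ·) 1

-- ===== PORT B =====
-- the while loop of B: running product and found flag
def evenProdB (n : Int) (prod : Int) (found : Bool) : Int :=
  if h : n > 0 then
    if PySem.Int.mod n 10 % 2 == 0 then
      evenProdB (PySem.Int.floordiv n 10) (prod * PySem.Int.mod n 10) true
    else
      evenProdB (PySem.Int.floordiv n 10) prod found
  else if found then prod else 0
termination_by n.toNat
decreasing_by
  all_goals rw [PySem.Int.floordiv_eq_ediv_of_pos (by omega)]; omega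

def even_num_pro_alt (n : Int) : Int := evenProdB n 1 false

-- ===== PRECONDITION & SPEC =====
def Spec_even_num_pro (n : Int) (out : Int) : Prop := out = even_num_pro_alt n
instance (n : Int) (out : Int) : Decidable (Spec_even_num_pro n out) := by unfold Spec_even_num_pro; infer_instance

-- ===== CLAIM (what is proved, stated in full; the proofs are below) =====
def Claim_equal_even_num_pro : Prop := ∀ (n : Int), Dom_even_num_pro n → Spec_even_num_pro n (even_num_pro n)

-- ===== LEMMAS AND PROOFS =====
theorem evenProdB_spec_aux (k : Nat) : ∀ (n : Int), n.toNat ≤ k → ∀ (prod : Int) (found : Bool),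
    evenProdB n prod found =
      if (evenDigitsA n).length = 0 then (if found then prod else 0)
      else (evenDigitsA n).foldl (· * ·) prod := by
  induction k with
  | zero =>
    intro n hn prod found
    have h : ¬ n > 0 := by omega
    rw [evenProdB, evenDigitsA]
    simp [h]
  | succ k ih =>
    intro n hn prod found
    rw [evenProdB, evenDigitsA]
    by_cases h : n > 0
    · have hlt : (PySem.Int.floordiv n 10).toNat ≤ k := by
        rw [PySem.Int.floordiv_eq_ediv_of_pos (by omega)]
        omega
      by_cases heven : (PySem.Int.mod n 10 % 2 == 0) = true
      · rw [dif_pos h, dif_pos h, if_pos heven, if_pos heven, List.singleton_append,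
          ih _ hlt]
        by_cases hre : (evenDigitsA (PySem.Int.floordiv n 10)).length = 0
        · have : evenDigitsA (PySem.Int.floordiv n 10) = [] :=
            List.eq_nil_of_length_eq_zero hre
          rw [this]
          simp
        · have : ¬ (PySem.Int.mod n 10 :: evenDigitsA (PySem.Int.floordiv n 10)).length = 0 := by
            simp
          rw [if_pos rfl, if_neg this, List.foldl_cons]
          rw [if_neg hre]
      · rw [dif_pos h, dif_pos h, if_neg heven, if_neg heven, List.nil_append, ih _ hlt]
    · rw [dif_neg h, dif_neg h]
      simp

theorem evenProdB_spec (n : Int) (prod : Int) (found : Bool) :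
    evenProdB n prod found =
      if (evenDigitsA n).length = 0 then (if found then prod else 0)
      else (evenDigitsA n).foldl (· * ·) prod :=
  evenProdB_spec_aux n.toNat n le_rfl prod found

-- ===== VERDICT (by name: the statement is the Claim_ definition above) =====
theorem even_num_pro_spec : Claim_equal_even_num_pro := by
  intro n _
  show even_num_pro n = even_num_pro_alt n
  rw [even_num_pro, even_num_pro_alt, evenProdB_spec]
  by_cases he : (evenDigitsA n).length = 0 <;> simp [he]
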